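-- pv_equiv track=rewrite | github.com/francis-ohara/coding-practice | codesignal/3_gswep_assessment.py | solution
-- ===== SOURCE A (Python) =====
-- def solution(commands):
--     position = 0
--
--     for command in commands:
--         if command == "L":
--             position -= 1
--         else:
--             position += 1
--
--     if position == 0:
--         return ""
--     elif position < 0:
--         return "L"
--     else:
--         return "R"
-- ===== SOURCE B (Python) =====
-- def solution(commands):
--     # Cancel opposite moves against a stack of unmatched moves (parenthesis-matching style).
--     # Invariant: the stack is homogeneous, so its top (if any) is the net direction.
--     stack = []
--     for c in commands:
--         d = "L" if c == "L" else "R"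
--         if stack and stack[-1] != d:
--             stack.pop()
--         else:
--             stack.append(d)
--     return stack[-1] if stack else ""
-- ===== Notes on version B (the rewrite author's own statement) =====
-- stated objective: alternative
-- what changed: Instead of a signed position accumulator, B cancels each move against a stack of unmatched opposite moves (parenthesis-matching style); the surviving stack is homogeneous and its top, or emptiness, directly gives the answer with no arithmetic or final sign branching.
import Mathlib
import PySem

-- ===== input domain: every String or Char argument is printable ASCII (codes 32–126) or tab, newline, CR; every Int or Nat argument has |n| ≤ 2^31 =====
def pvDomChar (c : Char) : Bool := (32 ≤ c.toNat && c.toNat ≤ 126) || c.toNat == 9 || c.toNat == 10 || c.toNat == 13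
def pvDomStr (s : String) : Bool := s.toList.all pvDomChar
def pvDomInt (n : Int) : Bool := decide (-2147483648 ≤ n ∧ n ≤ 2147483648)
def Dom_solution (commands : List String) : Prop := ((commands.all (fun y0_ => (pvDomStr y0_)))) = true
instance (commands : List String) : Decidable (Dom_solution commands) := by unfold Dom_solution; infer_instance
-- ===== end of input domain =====

-- B cancels opposite moves against a stack of unmatched moves instead of keeping a signed accumulator (objective: alternative); return value only.


-- ===== PORT A =====
def solution (commands : List String) : String :=
  let position := commands.foldl (fun position command =>
    if command = "L" then position - 1 else position + 1) (0 : Int)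
  if position = 0 then ""
  else if position < 0 then "L"
  else "R"

-- ===== PORT B =====
-- stack held top-at-head; Python's append/pop at the end is the same stack discipline
def solution_alt (commands : List String) : String :=
  let stack := commands.foldl (fun stack c =>
    let d := if c = "L" then "L" else "R"
    match stack with
    | t :: rest => if t ≠ d then rest else d :: t :: rest
    | [] => [d]) ([] : List String)
  match stack with
  | t :: _ => t
  | [] => ""

-- ===== PRECONDITION & SPEC =====
def Spec_solution (commands : List String) (out : String) : Prop := out = solution_alt commands
instance (commands : List String) (out : String) : Decidable (Spec_solution commands out) := by unfold Spec_solution; infer_instance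

-- ===== CLAIM (what is proved, stated in full; the proofs are below) =====
def Claim_equal_solution : Prop := ∀ (commands : List String), Dom_solution commands → Spec_solution commands (solution commands)

-- ===== LEMMAS AND PROOFS =====

-- the signed value of a stack
def pvVal (st : List String) : Int := (st.map (fun t => if t = "L" then (-1 : Int) else 1)).sum

-- one step of B's stack fold
def pvStep (stack : List String) (c : String) : List String :=
  let d := if c = "L" then "L" else "R"
  match stack with
  | t :: rest => if t ≠ d then rest else d :: t :: rest
  | [] => [d]

-- a stack is homogeneous: all "L" or all "R"
def pvHom (st : List String) : Prop :=
  st = List.replicate st.length "L" ∨ st = List.replicate st.length "R"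

theorem pvHom_nil : pvHom [] := Or.inl rfl

theorem pvVal_replicate_L (n : Nat) : pvVal (List.replicate n "L") = -(n : Int) := by
  induction n with
  | zero => rfl
  | succ k ih =>
    rw [List.replicate_succ]
    simp only [pvVal, List.map_cons, List.sum_cons] at ih ⊢
    rw [if_pos trivial, ih]
    push_cast; ring

theorem pvVal_replicate_R (n : Nat) : pvVal (List.replicate n "R") = (n : Int) := by
  induction n with
  | zero => rfl
  | succ k ih =>
    rw [List.replicate_succ]
    simp only [pvVal, List.map_cons, List.sum_cons] at ih ⊢
    rw [if_neg (by decide), ih]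
    push_cast; ring

-- invariant preservation plus value tracking for one step
theorem pvStep_inv (st : List String) (c : String) (h : pvHom st) :
    pvHom (pvStep st c) ∧
      pvVal (pvStep st c) = pvVal st + (if c = "L" then (-1 : Int) else 1) := by
  cases st with
  | nil =>
    by_cases hc : c = "L"
    · exact ⟨Or.inl (by simp [pvStep, hc]), by simp [pvStep, pvVal, hc]⟩
    · exact ⟨Or.inr (by simp [pvStep, hc]), by simp [pvStep, pvVal, hc]⟩
  | cons t rest =>
    rcases h with hh | hh <;>
      rw [List.length_cons, List.replicate_succ] at hh
    · -- all-"L" stack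
      obtain ⟨ht, hr⟩ := List.cons_eq_cons.mp hh
      subst ht
      by_cases hc : c = "L"
      · have e : pvStep ("L" :: rest) c = "L" :: "L" :: rest := by simp [pvStep, hc]
        rw [e]
        constructor
        · left
          rw [List.length_cons, List.length_cons, List.replicate_succ,
            List.replicate_succ, ← hr]
        · simp [pvVal, hc]; ring
      · have e : pvStep ("L" :: rest) c = rest := by simp [pvStep, hc]
        rw [e]
        exact ⟨Or.inl hr, by simp [pvVal, hc]⟩
    · -- all-"R" stack
      obtain ⟨ht, hr⟩ := List.cons_eq_cons.mp hh
      subst ht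
      by_cases hc : c = "L"
      · have e : pvStep ("R" :: rest) c = rest := by simp [pvStep, hc]
        rw [e]
        exact ⟨Or.inr hr, by simp [pvVal, hc]⟩
      · have e : pvStep ("R" :: rest) c = "R" :: "R" :: rest := by simp [pvStep, hc]
        rw [e]
        constructor
        · right
          rw [List.length_cons, List.length_cons, List.replicate_succ,
            List.replicate_succ, ← hr]
        · simp [pvVal, hc]; ring

-- the whole fold: homogeneous result whose value equals A's accumulator
theorem pvFold_inv (commands : List String) (st : List String) (h : pvHom st) :
    pvHom (commands.foldl pvStep st) ∧
      commands.foldl (fun position command =>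
          if command = "L" then position - 1 else position + 1) (pvVal st)
        = pvVal (commands.foldl pvStep st) := by
  induction commands generalizing st with
  | nil => exact ⟨h, rfl⟩
  | cons c cs ih =>
    obtain ⟨h1, h2⟩ := pvStep_inv st c h
    obtain ⟨h3, h4⟩ := ih (pvStep st c) h1
    refine ⟨h3, ?_⟩
    rw [List.foldl_cons, List.foldl_cons, ← h4]
    congr 1
    by_cases hc : c = "L" <;> simp [hc] at h2 ⊢ <;> omega

-- ===== VERDICT (by name: the statement is the Claim_ definition above) =====
theorem solution_spec : Claim_equal_solution := by
  intro commands _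
  unfold Spec_solution solution solution_alt
  obtain ⟨hhom, hval⟩ := pvFold_inv commands [] pvHom_nil
  have hfoldeq : (commands.foldl (fun stack c =>
      let d := if c = "L" then "L" else "R"
      match stack with
      | t :: rest => if t ≠ d then rest else d :: t :: rest
      | [] => [d]) ([] : List String)) = commands.foldl pvStep [] := rfl
  rw [hfoldeq]
  rw [show pvVal ([] : List String) = 0 from rfl] at hval
  cases hst : commands.foldl pvStep [] with
  | nil =>
    rw [hst] at hval
    rw [show pvVal ([] : List String) = 0 from rfl] at hval
    simp [hval]
  | cons t rest =>
    rw [hst] at hval hhom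
    rcases hhom with hh | hh <;>
      rw [List.length_cons, List.replicate_succ] at hh
    · obtain ⟨ht, hr⟩ := List.cons_eq_cons.mp hh
      subst ht
      have hv : pvVal ("L" :: rest) = -((rest.length : Int) + 1) := by
        calc pvVal ("L" :: rest)
            = pvVal (List.replicate (rest.length + 1) "L") := by
              rw [List.replicate_succ, ← hr]
          _ = -(((rest.length + 1 : Nat)) : Int) := pvVal_replicate_L _
          _ = -((rest.length : Int) + 1) := by push_cast; ring
      rw [hv] at hval
      have h1 : ¬((-((rest.length : Int) + 1)) = 0) := by omega
      have h2 : (-((rest.length : Int) + 1)) < 0 := by omega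
      simp [hval]
      split_ifs <;> first | rfl | omega
    · obtain ⟨ht, hr⟩ := List.cons_eq_cons.mp hh
      subst ht
      have hv : pvVal ("R" :: rest) = (rest.length : Int) + 1 := by
        calc pvVal ("R" :: rest)
            = pvVal (List.replicate (rest.length + 1) "R") := by
              rw [List.replicate_succ, ← hr]
          _ = (((rest.length + 1 : Nat)) : Int) := pvVal_replicate_R _
          _ = (rest.length : Int) + 1 := by push_cast; ring
      rw [hv] at hval
      have h1 : ¬(((rest.length : Int) + 1) = 0) := by omega
      have h2 : ¬(((rest.length : Int) + 1) < 0) := by omega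
      simp [hval, h1, h2]
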